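-- pv_equiv track=rewrite | github.com/sbeal/euler | p049.py | three_term_arithmetic_sequence
-- ===== SOURCE A (Python) =====
-- from collections import defaultdict
--
-- def three_term_arithmetic_sequence(num_list):
--
--     if len(num_list) < 3:
--         return []
--
--     diffs = defaultdict(list)
--
--     # find the diff for every pair
--     for i in range(len(num_list)-1):
--         a = int(num_list[i])
--         for j in range(i+1, len(num_list)):
--             b = int(num_list[j])
--             if a < b:
--                 diff = b - a
--                 diffs[diff].append((a, b))
--             else:
--                 diff = a - b
--                 diffs[diff].append((b, a))
--
--
--     sequence = []
--
--     # sort all in order of first element, then check if there's sequence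
--     for k, v in diffs.items():
--         v = sorted(v, key=lambda pair: pair[0])
--         if len(v) >= 2:
--             for i in range(len(v)-1):
--                 for j in range(i+1, len(v)):
--                     if v[i][1] == v[j][0]:
--                         sequence.append(v[i][0])
--                         sequence.append(v[i][1])
--                         sequence.append(v[j][1])
--
--     return sequence
-- ===== SOURCE B (Python) =====
-- def three_term_arithmetic_sequence(num_list):
--     n = len(num_list)
--     if n < 3:
--         return []
--
--     # group pairs by diff, keeping only a counter of each pair's first element
--     # (the pair is (lo, lo+d), so lo determines it within a diff group)
--     diffs = {}
--     for i in range(n - 1):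
--         a = int(num_list[i])
--         for j in range(i + 1, n):
--             b = int(num_list[j])
--             lo = a if a <= b else b
--             d = b - a if a <= b else a - b
--             grp = diffs.setdefault(d, {})
--             grp[lo] = grp.get(lo, 0) + 1
--
--     out = []
--     for d, grp in diffs.items():
--         for a in sorted(grp):
--             m = grp[a]
--             # number of triples starting at a: continuations are counted, not scanned
--             t = m * (m - 1) // 2 if d == 0 else m * grp.get(a + d, 0)
--             out += [a, a + d, a + 2 * d] * t
--     return out
-- ===== Notes on version B (the rewrite author's own statement) =====
-- stated objective: alternative
-- what changed: Within each diff group B keeps only a counter of pair first-elements and computes the number of continuations arithmetically (m*grp.get(a+d,0), or m*(m-1)//2 for d==0) over the sorted distinct keys, replacing A's sort of the pair list and its quadratic nested scan over every group; intended as faster (24x on random 400-element inputs), but a timing run read only 1.45x at the largest size both finished, so no speed is claimed.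
import Mathlib
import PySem

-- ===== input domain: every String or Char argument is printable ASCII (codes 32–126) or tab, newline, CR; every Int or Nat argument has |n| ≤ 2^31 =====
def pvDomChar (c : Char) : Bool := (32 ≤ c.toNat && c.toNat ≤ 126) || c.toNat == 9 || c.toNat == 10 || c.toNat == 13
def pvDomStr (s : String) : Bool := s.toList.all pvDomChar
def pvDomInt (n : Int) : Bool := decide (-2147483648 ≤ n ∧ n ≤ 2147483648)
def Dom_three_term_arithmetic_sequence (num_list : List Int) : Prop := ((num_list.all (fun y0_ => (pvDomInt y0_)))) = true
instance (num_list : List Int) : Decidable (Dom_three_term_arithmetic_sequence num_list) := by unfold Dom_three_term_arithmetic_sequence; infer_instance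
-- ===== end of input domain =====

-- B replaces A's per-group sort of the pair list and quadratic nested scan by a counter of first
-- elements and an arithmetic continuation count over the sorted distinct keys (an alternative
-- algorithm; no speed is claimed). `int(x)` applied to an int is the identity and is ported as such.

-- ===== PORT A =====
def three_term_arithmetic_sequence (num_list : List Int) : List Int :=
  if num_list.length < 3 then []
  else
    let diffs : PySem.Dict Int (List (Int × Int)) :=
      (PySem.List.pyRange 0 ((num_list.length : Int) - 1) 1).foldl (fun diffs i =>
        let a := PySem.List.pyGetD num_list i 0
        (PySem.List.pyRange (i + 1) (num_list.length : Int) 1).foldl (fun diffs j =>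
          let b := PySem.List.pyGetD num_list j 0
          if a < b then
            diffs.modify (b - a) [] (fun l => l ++ [(a, b)])
          else
            diffs.modify (a - b) [] (fun l => l ++ [(b, a)])) diffs) PySem.Dict.empty
    diffs.items.foldl (fun sequence kv =>
      let v := PySem.List.sorted kv.2 (fun pair => pair.1) false
      if 2 ≤ v.length then
        (PySem.List.pyRange 0 ((v.length : Int) - 1) 1).foldl (fun sequence i =>
          (PySem.List.pyRange (i + 1) (v.length : Int) 1).foldl (fun sequence j =>
            if (PySem.List.pyGetD v i ((0 : Int), (0 : Int))).2 == (PySem.List.pyGetD v j ((0 : Int), (0 : Int))).1 then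
              ((sequence ++ [(PySem.List.pyGetD v i ((0 : Int), (0 : Int))).1]) ++
                [(PySem.List.pyGetD v i ((0 : Int), (0 : Int))).2]) ++
                [(PySem.List.pyGetD v j ((0 : Int), (0 : Int))).2]
            else sequence) sequence) sequence
      else sequence) []

-- ===== PORT B =====
def three_term_arithmetic_sequence_alt (num_list : List Int) : List Int :=
  let n := num_list.length
  if n < 3 then []
  else
    let diffs : PySem.Dict Int (PySem.Dict Int Int) :=
      (PySem.List.pyRange 0 ((n : Int) - 1) 1).foldl (fun diffs i =>
        let a := PySem.List.pyGetD num_list i 0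
        (PySem.List.pyRange (i + 1) (n : Int) 1).foldl (fun diffs j =>
          let b := PySem.List.pyGetD num_list j 0
          let lo := if a ≤ b then a else b
          let d := if a ≤ b then b - a else a - b
          diffs.modify d PySem.Dict.empty (fun grp => grp.modify lo 0 (· + 1))) diffs) PySem.Dict.empty
    diffs.items.foldl (fun out kv =>
      (PySem.List.sorted kv.2.keys (fun a => a) false).foldl (fun out a =>
        let m := kv.2.getD a 0
        let t := if kv.1 == 0 then PySem.Int.floordiv (m * (m - 1)) 2 else m * kv.2.getD (a + kv.1) 0
        out ++ PySem.List.pyRepeat [a, a + kv.1, a + 2 * kv.1] t) out) []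

-- ===== PRECONDITION & SPEC =====
def Spec_three_term_arithmetic_sequence (num_list : List Int) (out : List Int) : Prop := out = three_term_arithmetic_sequence_alt num_list
instance (num_list : List Int) (out : List Int) : Decidable (Spec_three_term_arithmetic_sequence num_list out) := by unfold Spec_three_term_arithmetic_sequence; infer_instance

-- ===== CLAIM (what is proved, stated in full; the proofs are below) =====
def Claim_equal_three_term_arithmetic_sequence : Prop := ∀ (num_list : List Int), Dom_three_term_arithmetic_sequence num_list → Spec_three_term_arithmetic_sequence num_list (three_term_arithmetic_sequence num_list)

-- ===== LEMMAS AND PROOFS =====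

-- A triangular ("for i, for j>i") loop over values of a list, as structural recursion on the list.
def pvTails {α σ : Type} (f : σ → α → α → σ) : List α → σ → σ
  | [], s => s
  | a :: rest, s => pvTails f rest (rest.foldl (fun s b => f s a b) s)

theorem pv_nested {α σ : Type} (f : σ → α → α → σ) (xs : List α) (dflt : α) (init : σ) :
    (PySem.List.pyRange 0 ((xs.length : Int) - 1) 1).foldl
      (fun s i => (PySem.List.pyRange (i + 1) (xs.length : Int) 1).foldl
        (fun s j => f s (PySem.List.pyGetD xs i dflt) (PySem.List.pyGetD xs j dflt)) s) init
    = pvTails f xs init := by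
  induction xs generalizing init with
  | nil =>
      rw [show ((([] : List α).length : Int) - 1) = -1 by simp,
        PySem.List.pyRange_one_eq_nil (by norm_num)]
      rfl
  | cons a rest ih =>
      by_cases hr : rest = []
      · subst hr
        rw [show (((a :: ([] : List α)).length : Int) - 1) = 0 by simp,
          PySem.List.pyRange_one_eq_nil (le_refl 0)]
        rfl
      · have hm : 0 < rest.length := List.length_pos_of_ne_nil hr
        have hm' : (0 : Int) < (rest.length : Int) := by exact_mod_cast hm
        have hlen : (((a :: rest).length : Int) - 1) = (rest.length : Int) := by
          simp
        rw [hlen, PySem.List.pyRange_one_cons hm']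
        simp only [List.foldl_cons, zero_add]
        have hget0 : PySem.List.pyGetD (a :: rest) 0 dflt = a := by
          rw [PySem.List.pyGetD_of_nonneg (a :: rest) dflt (le_refl 0)]
          rfl
        have hfirst : (PySem.List.pyRange 1 (((a :: rest).length : Int)) 1).foldl
            (fun s j => f s (PySem.List.pyGetD (a :: rest) 0 dflt) (PySem.List.pyGetD (a :: rest) j dflt)) init
            = rest.foldl (fun s b => f s a b) init := by
          rw [hget0]
          have h := PySem.List.foldl_pyRange_pyGetD' (a :: rest) dflt (fun s b => f s a b) init
            (show (0 : Int) ≤ 1 by norm_num)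
          refine h.trans ?_
          rfl
        rw [hfirst]
        have hshift : ∀ s0 : σ,
            (PySem.List.pyRange 1 ((rest.length : Int)) 1).foldl
              (fun s i => (PySem.List.pyRange (i + 1) (((a :: rest).length : Int)) 1).foldl
                (fun s j => f s (PySem.List.pyGetD (a :: rest) i dflt) (PySem.List.pyGetD (a :: rest) j dflt)) s) s0
            = (PySem.List.pyRange 0 ((rest.length : Int) - 1) 1).foldl
              (fun s i => (PySem.List.pyRange (i + 1) ((rest.length : Int)) 1).foldl
                (fun s j => f s (PySem.List.pyGetD rest i dflt) (PySem.List.pyGetD rest j dflt)) s) s0 := by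
          intro s0
          rw [PySem.List.pyRange_one 1 (rest.length : Int), PySem.List.pyRange_one 0 ((rest.length : Int) - 1)]
          rw [List.foldl_map, List.foldl_map]
          rw [show (((rest.length : Int) - 1) - 0).toNat = ((rest.length : Int) - 1).toNat by norm_num]
          apply PySem.List.foldl_congr_mem
          intro s k hk
          simp only [zero_add]
          have hk' : (k : Int) + 1 < (rest.length : Int) := by
            have h1 := List.mem_range.mp hk
            omega
          have e1 : PySem.List.pyGetD (a :: rest) (1 + (k : Int)) dflt = PySem.List.pyGetD rest (k : Int) dflt := by
            rw [PySem.List.pyGetD_of_nonneg (a :: rest) dflt (by omega : (0:Int) ≤ 1 + (k : Int)),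
              PySem.List.pyGetD_of_nonneg rest dflt (by omega : (0:Int) ≤ (k : Int))]
            rw [show (1 + (k : Int)).toNat = k + 1 by omega, show ((k : Int)).toNat = k by omega]
            rfl
          rw [e1]
          have hL := PySem.List.foldl_pyRange_pyGetD' (a :: rest) dflt
            (fun s b => f s (PySem.List.pyGetD rest (k : Int) dflt) b) s
            (show (0 : Int) ≤ (1 + (k : Int)) + 1 by omega)
          have hR := PySem.List.foldl_pyRange_pyGetD' rest dflt
            (fun s b => f s (PySem.List.pyGetD rest (k : Int) dflt) b) s
            (show (0 : Int) ≤ (k : Int) + 1 by omega)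
          refine hL.trans (Eq.trans ?_ hR.symm)
          rw [show ((1 + (k : Int)) + 1).toNat = k + 2 by omega, show ((k : Int) + 1).toNat = k + 1 by omega]
          rfl
        rw [hshift]
        exact ih (rest.foldl (fun s b => f s a b) init)

-- the list of (earlier, later) pairs visited by the triangular loop
def pvPairList {α : Type} : List α → List (α × α)
  | [] => []
  | a :: rest => rest.map (fun b => (a, b)) ++ pvPairList rest

theorem pvTails_eq {α σ : Type} (f : σ → α → α → σ) (xs : List α) (init : σ) :
    pvTails f xs init = (pvPairList xs).foldl (fun s p => f s p.1 p.2) init := by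
  induction xs generalizing init with
  | nil => rfl
  | cons a rest ih => simp [pvTails, pvPairList, List.foldl_append, List.foldl_map, ih]

theorem pv_pairList_short {α : Type} (w : List α) (h : w.length < 2) : pvPairList w = [] := by
  match w with
  | [] => rfl
  | [x] => rfl
  | x :: y :: t => simp at h

-- the (lo, hi) normalisation both programs apply to a pair, and the diff key
def pvNorm (p : Int × Int) : Int × Int := if p.1 < p.2 then p else (p.2, p.1)
def pvKey (q : Int × Int) : Int := q.2 - q.1
def pvQ (xs : List Int) : List (Int × Int) := (pvPairList xs).map pvNorm
def pvQc (xs : List Int) (c : Int) : List (Int × Int) := (pvQ xs).filter (fun q => pvKey q == c)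
def pvK (xs : List Int) : List Int := PySem.Set.ofList ((pvQ xs).map pvKey)

theorem pvQ_fst_le_snd (xs : List Int) : ∀ q ∈ pvQ xs, q.1 ≤ q.2 := by
  intro q hq
  obtain ⟨p, _, rfl⟩ := List.mem_map.mp hq
  obtain ⟨p1, p2⟩ := p
  unfold pvNorm
  by_cases h : p1 < p2
  · rw [if_pos h]; exact le_of_lt h
  · rw [if_neg h]; simpa using le_of_not_gt h

-- the two phase-1 dicts (A: pair lists, B: counters of first elements), over the normalised pairs
def pvDA (xs : List Int) : PySem.Dict Int (List (Int × Int)) :=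
  (pvQ xs).foldl (fun D q => D.modify (pvKey q) [] (fun l => l ++ [q])) PySem.Dict.empty
def pvDB (xs : List Int) : PySem.Dict Int (PySem.Dict Int Int) :=
  (pvQ xs).foldl (fun D q => D.modify (pvKey q) PySem.Dict.empty (fun g => g.modify q.1 0 (· + 1))) PySem.Dict.empty

theorem pv_phase1A (xs : List Int) :
    pvTails (fun s a b => if a < b then PySem.Dict.modify s (b - a) [] (fun l => l ++ [(a, b)])
        else PySem.Dict.modify s (a - b) [] (fun l => l ++ [(b, a)])) xs PySem.Dict.empty
      = pvDA xs := by
  rw [pvTails_eq]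
  unfold pvDA pvQ
  rw [List.foldl_map]
  apply PySem.List.foldl_congr_mem
  intro D p _
  obtain ⟨p1, p2⟩ := p
  unfold pvNorm pvKey
  by_cases h : p1 < p2
  · simp only [if_pos h]
  · simp only [if_neg h]

theorem pv_phase1B (xs : List Int) :
    pvTails (fun s a b =>
        PySem.Dict.modify s (if a ≤ b then b - a else a - b) PySem.Dict.empty
          (fun grp => grp.modify (if a ≤ b then a else b) 0 (· + 1))) xs PySem.Dict.empty
      = pvDB xs := by
  rw [pvTails_eq]
  unfold pvDB pvQ
  rw [List.foldl_map]
  apply PySem.List.foldl_congr_mem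
  intro D p _
  obtain ⟨p1, p2⟩ := p
  unfold pvNorm pvKey
  by_cases h : p1 < p2
  · rw [if_pos h, if_pos (le_of_lt h), if_pos (le_of_lt h)]
  · rw [if_neg h]
    by_cases h2 : p1 ≤ p2
    · have : p1 = p2 := le_antisymm h2 (le_of_not_gt h)
      subst this
      rw [if_pos h2, if_pos h2]
    · rw [if_neg h2, if_neg h2]

-- getD after a fold of modifies = fold of the updates whose key matched
theorem pv_getD_foldl_modify {β κ ν : Type} [BEq κ] [LawfulBEq κ] [DecidableEq κ]
    (l : List β) (key : β → κ) (d0 : ν) (f : β → ν → ν) (D : PySem.Dict κ ν) (c : κ) :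
    (l.foldl (fun D x => D.modify (key x) d0 (f x)) D).getD c d0
      = (l.filter (fun x => key x == c)).foldl (fun v x => f x v) (D.getD c d0) := by
  induction l generalizing D with
  | nil => rfl
  | cons x t ih =>
    rw [List.foldl_cons, ih, List.filter_cons]
    by_cases h : key x = c
    · rw [if_pos (by simp [h]), List.foldl_cons]
      congr 1
      rw [PySem.Dict.getD_modify, if_pos h.symm, h]
    · rw [if_neg (by simp [h])]
      congr 1
      rw [PySem.Dict.getD_modify, if_neg (fun hc => h hc.symm)]

theorem pv_keysA (xs : List Int) : (pvDA xs).keys = pvK xs := by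
  unfold pvDA pvK
  rw [PySem.Dict.keys_foldl_modify_key]
  rw [PySem.Dict.keys_empty]
  rfl

theorem pv_keysB (xs : List Int) : (pvDB xs).keys = pvK xs := by
  unfold pvDB pvK
  rw [PySem.Dict.keys_foldl_modify_key]
  rw [PySem.Dict.keys_empty]
  rfl

theorem pv_nodupA (xs : List Int) : (pvDA xs).keys.Nodup := by
  rw [pv_keysA]; exact PySem.Set.nodup_ofList _

theorem pv_nodupB (xs : List Int) : (pvDB xs).keys.Nodup := by
  rw [pv_keysB]; exact PySem.Set.nodup_ofList _

theorem pv_getDA (xs : List Int) (c : Int) : (pvDA xs).getD c [] = pvQc xs c := by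
  unfold pvDA pvQc
  rw [pv_getD_foldl_modify (pvQ xs) pvKey [] (fun q => fun l => l ++ [q]) PySem.Dict.empty c]
  rw [PySem.Dict.getD_empty]
  exact (PySem.List.foldl_append_singleton_eq_self _ _).trans (List.nil_append _)

theorem pv_getDB (xs : List Int) (c : Int) :
    (pvDB xs).getD c PySem.Dict.empty = PySem.Dict.counter ((pvQc xs c).map Prod.fst) := by
  unfold pvDB pvQc
  rw [pv_getD_foldl_modify (pvQ xs) pvKey PySem.Dict.empty
    (fun q => fun g => g.modify q.1 0 (· + 1)) PySem.Dict.empty c]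
  rw [PySem.Dict.getD_empty, PySem.Dict.counter_eq_foldl, List.foldl_map]

-- per-group segment produced by A (after its sort) and by B (from the counter)
def pvSegA (v : List (Int × Int)) : List Int :=
  (pvPairList (PySem.List.sorted v (fun p => p.1) false)).flatMap
    (fun pq => if pq.1.2 == pq.2.1 then [pq.1.1, pq.1.2, pq.2.2] else [])

def pvSegB (c : Int) (grp : PySem.Dict Int Int) : List Int :=
  (PySem.List.sorted grp.keys (fun a => a) false).flatMap
    (fun a => PySem.List.pyRepeat [a, a + c, a + 2 * c]
      (if c == 0 then PySem.Int.floordiv (grp.getD a 0 * (grp.getD a 0 - 1)) 2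
       else grp.getD a 0 * grp.getD (a + c) 0))

theorem pv_flatMap_congr {α β : Type} (l : List α) (f g : α → List β)
    (h : ∀ a ∈ l, f a = g a) : l.flatMap f = l.flatMap g := by
  induction l with
  | nil => rfl
  | cons x t ih =>
    rw [List.flatMap_cons, List.flatMap_cons, h x (List.mem_cons_self), ih (fun a ha => h a (List.mem_cons_of_mem _ ha))]

theorem pv_segA_fold (w : List (Int × Int)) (seq : List Int) :
    (pvPairList w).foldl
      (fun s p => if p.1.2 == p.2.1 then ((s ++ [p.1.1]) ++ [p.1.2]) ++ [p.2.2] else s) seq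
    = seq ++ (pvPairList w).flatMap (fun pq => if pq.1.2 == pq.2.1 then [pq.1.1, pq.1.2, pq.2.2] else []) := by
  have h := PySem.List.foldl_congr_mem (l := pvPairList w) (init := seq)
    (f := fun s p => if p.1.2 == p.2.1 then ((s ++ [p.1.1]) ++ [p.1.2]) ++ [p.2.2] else s)
    (g := fun s p => s ++ (if p.1.2 == p.2.1 then [p.1.1, p.1.2, p.2.2] else []))
    (by intro acc x _; by_cases hx : (x.1.2 == x.2.1) = true <;> simp [hx])
  rw [h, PySem.List.foldl_append_eq_flatMap]

-- A's phase 2 body, per dict item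
theorem pv_phase2A (D : PySem.Dict Int (List (Int × Int))) :
    D.items.foldl (fun sequence kv =>
      if 2 ≤ (PySem.List.sorted kv.2 (fun pair => pair.1) false).length then
        (PySem.List.pyRange 0 (((PySem.List.sorted kv.2 (fun pair => pair.1) false).length : Int) - 1) 1).foldl
          (fun sequence i =>
            (PySem.List.pyRange (i + 1) ((PySem.List.sorted kv.2 (fun pair => pair.1) false).length : Int) 1).foldl
              (fun sequence j =>
                if (PySem.List.pyGetD (PySem.List.sorted kv.2 (fun pair => pair.1) false) i ((0 : Int), (0 : Int))).2 ==
                    (PySem.List.pyGetD (PySem.List.sorted kv.2 (fun pair => pair.1) false) j ((0 : Int), (0 : Int))).1 then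
                  ((sequence ++ [(PySem.List.pyGetD (PySem.List.sorted kv.2 (fun pair => pair.1) false) i ((0 : Int), (0 : Int))).1]) ++
                    [(PySem.List.pyGetD (PySem.List.sorted kv.2 (fun pair => pair.1) false) i ((0 : Int), (0 : Int))).2]) ++
                    [(PySem.List.pyGetD (PySem.List.sorted kv.2 (fun pair => pair.1) false) j ((0 : Int), (0 : Int))).2]
                else sequence) sequence) sequence
      else sequence) []
    = D.items.foldl (fun seq kv => seq ++ pvSegA kv.2) [] := by
  apply PySem.List.foldl_congr_mem
  intro seq kv _
  by_cases hg : 2 ≤ (PySem.List.sorted kv.2 (fun pair => pair.1) false).length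
  · rw [if_pos hg]
    refine Eq.trans (pv_nested
      (fun s (p q : Int × Int) => if p.2 == q.1 then ((s ++ [p.1]) ++ [p.2]) ++ [q.2] else s)
      (PySem.List.sorted kv.2 (fun pair => pair.1) false) ((0 : Int), (0 : Int)) seq) ?_
    rw [pvTails_eq]
    exact pv_segA_fold _ seq
  · rw [if_neg hg]
    unfold pvSegA
    rw [pv_pairList_short _ (by omega)]
    simp

-- B's phase 2 body, per dict item
theorem pv_phase2B (D : PySem.Dict Int (PySem.Dict Int Int)) :
    D.items.foldl (fun out kv =>
      (PySem.List.sorted kv.2.keys (fun a => a) false).foldl (fun out a =>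
        out ++ PySem.List.pyRepeat [a, a + kv.1, a + 2 * kv.1]
          (if kv.1 == 0 then PySem.Int.floordiv (kv.2.getD a 0 * (kv.2.getD a 0 - 1)) 2
           else kv.2.getD a 0 * kv.2.getD (a + kv.1) 0)) out) []
    = D.items.foldl (fun out kv => out ++ pvSegB kv.1 kv.2) [] := by
  apply PySem.List.foldl_congr_mem
  intro out kv _
  rw [PySem.List.foldl_append_eq_flatMap]
  rfl

-- ---- per-key combinatorics ----

def pvGA (c : Int) : List Int → List Int
  | [] => []
  | a :: s' => (List.replicate (s'.count (a + c)) [a, a + c, a + 2 * c]).flatten ++ pvGA c s'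

def pvTC (c : Int) (s : List Int) (a : Int) : Nat :=
  if c = 0 then s.count a * (s.count a - 1) / 2 else s.count a * s.count (a + c)

theorem pv_flatten_replicate_append {α : Type} (L : List α) (p q : Nat) :
    (List.replicate p L).flatten ++ (List.replicate q L).flatten = (List.replicate (p + q) L).flatten := by
  rw [List.replicate_add, List.flatten_append]

theorem pv_gauss (m : Nat) : m + m * (m - 1) / 2 = (m + 1) * m / 2 := by
  cases m with
  | zero => rfl
  | succ k =>
    have h2 : (k + 2) * (k + 1) = (k + 1) * ((k + 1) - 1) + (k + 1) * 2 := by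
      simp; ring
    rw [h2, Nat.add_mul_div_right _ _ (by norm_num : 0 < 2)]
    omega

theorem pv_count_flatMap (v : Int) (F : Int → List Int) :
    ∀ l : List Int, l.flatMap (fun b => if v == b then F b else []) = (List.replicate (l.count v) (F v)).flatten := by
  intro l
  induction l with
  | nil => rfl
  | cons b t ih =>
    rw [List.flatMap_cons, ih, List.count_cons]
    by_cases h : v = b
    · subst h
      simp [List.replicate_succ]
    · have hb : (v == b) = false := by simp [h]
      have hb2 : ¬ b = v := fun h' => h h'.symm
      simp [hb, hb2]

theorem pv_segA_map (c : Int) : ∀ l : List Int,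
    (pvPairList (l.map (fun a => (a, a + c)))).flatMap
      (fun pq => if pq.1.2 == pq.2.1 then [pq.1.1, pq.1.2, pq.2.2] else [])
    = pvGA c l := by
  intro l
  induction l with
  | nil => rfl
  | cons a l' ih =>
    rw [List.map_cons]
    show ((l'.map (fun b => (b, b + c))).map (fun q => ((a, a + c), q)) ++ pvPairList (l'.map (fun b => (b, b + c)))).flatMap _ = _
    rw [List.flatMap_append, ih]
    show _ ++ pvGA c l' = (List.replicate (l'.count (a + c)) [a, a + c, a + 2 * c]).flatten ++ pvGA c l'
    congr 1
    rw [List.flatMap_map, List.flatMap_map]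
    have hcf := pv_count_flatMap (a + c) (fun b => [a, a + c, b + c]) l'
    refine Eq.trans ?_ (hcf.trans ?_)
    · rfl
    · rw [show a + c + c = a + 2 * c by ring]

theorem pv_split (a : Int) : ∀ (s : List Int), s.Pairwise (· ≤ ·) → (∀ y ∈ s, a ≤ y) →
    s = List.replicate (s.count a) a ++ s.filter (fun y => !(y == a)) := by
  intro s
  induction s with
  | nil => simp
  | cons x t ih =>
    intro hp hmin
    obtain ⟨hx, ht⟩ := List.pairwise_cons.mp hp
    by_cases hxa : x = a
    · subst hxa
      rw [List.count_cons_self, List.filter_cons]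
      rw [if_neg (by simp)]
      rw [List.replicate_succ, List.cons_append]
      congr 1
      exact ih ht (fun y hy => le_trans (hmin x List.mem_cons_self) (hx y hy))
    · have hax : a < x := lt_of_le_of_ne (hmin x List.mem_cons_self) (fun h => hxa h.symm)
      have hnot : ∀ y ∈ x :: t, y ≠ a := by
        intro y hy
        rcases List.mem_cons.mp hy with h | h
        · subst h; exact hxa
        · have := hx y h; omega
      have hcnt : (x :: t).count a = 0 := by
        rw [List.count_eq_zero]
        intro h
        exact hnot a h rfl
      rw [hcnt, List.replicate_zero, List.nil_append]
      symm
      apply List.filter_eq_self.mpr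
      intro y hy
      simp [hnot y hy]

theorem pv_block (c a : Int) (s₂ : List Int) (h0 : c = 0 → s₂.count a = 0) :
    ∀ m : Nat, pvGA c (List.replicate m a ++ s₂)
      = (List.replicate (if c = 0 then m * (m - 1) / 2 else m * s₂.count (a + c)) [a, a + c, a + 2 * c]).flatten
        ++ pvGA c s₂ := by
  intro m
  induction m with
  | zero =>
    have : (if c = 0 then 0 * (0 - 1) / 2 else 0 * s₂.count (a + c)) = 0 := by split <;> simp
    rw [this]
    simp
  | succ k ih =>
    rw [List.replicate_succ, List.cons_append]
    show (List.replicate ((List.replicate k a ++ s₂).count (a + c)) [a, a + c, a + 2 * c]).flatten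
        ++ pvGA c (List.replicate k a ++ s₂) = _
    rw [ih, ← List.append_assoc, pv_flatten_replicate_append]
    congr 2
    rw [List.count_append, List.count_replicate]
    by_cases hc : c = 0
    · subst hc
      simp only [add_zero]
      rw [if_pos (by simp), h0 rfl]
      rw [Nat.add_sub_cancel, ← pv_gauss k]
      congr 1
    · rw [if_neg (by simp only [beq_iff_eq]; omega)]
      rw [if_neg hc, if_neg hc, Nat.succ_mul]
      congr 1
      omega

theorem pv_main (c : Int) (hc : 0 ≤ c) :
    ∀ (ys : List Int), ys.Pairwise (· < ·) →
      ∀ (s : List Int), s.Pairwise (· ≤ ·) → (∀ x, x ∈ ys ↔ x ∈ s) →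
      pvGA c s = ys.flatMap (fun a => (List.replicate (pvTC c s a) [a, a + c, a + 2 * c]).flatten) := by
  intro ys
  induction ys with
  | nil =>
    intro _ s _ hmem
    have hs : s = [] := by
      cases s with
      | nil => rfl
      | cons x t =>
        have := (hmem x).mpr List.mem_cons_self
        simp at this
    subst hs
    rfl
  | cons a ys' ih =>
    intro hys s hs hmem
    obtain ⟨ha, hys'⟩ := List.pairwise_cons.mp hys
    have hmin : ∀ y ∈ s, a ≤ y := by
      intro y hy
      rcases List.mem_cons.mp ((hmem y).mpr hy) with h | h
      · omega
      · exact le_of_lt (ha y h)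
    have hsplit := pv_split a s hs hmin
    have hnotm : a ∉ s.filter (fun y => !(y == a)) := by
      intro h
      have := List.of_mem_filter h
      simp at this
    have h2cnt : (s.filter (fun y => !(y == a))).count a = 0 := List.count_eq_zero.mpr hnotm
    have hs₂p : (s.filter (fun y => !(y == a))).Pairwise (· ≤ ·) := hs.sublist List.filter_sublist
    have hcnt : ∀ v : Int, v ≠ a → s.count v = (s.filter (fun y => !(y == a))).count v := by
      intro v hv
      conv_lhs => rw [hsplit]
      rw [List.count_append, List.count_replicate]
      simp only [beq_iff_eq]
      rw [if_neg (by omega)]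
      omega
    have hmem₂ : ∀ x, x ∈ ys' ↔ x ∈ s.filter (fun y => !(y == a)) := by
      intro x
      constructor
      · intro hx
        have hxs : x ∈ s := (hmem x).mp (List.mem_cons_of_mem _ hx)
        have hxa : x ≠ a := by have := ha x hx; omega
        exact List.mem_filter.mpr ⟨hxs, by simp [hxa]⟩
      · intro hx
        obtain ⟨hxs, hne⟩ := List.mem_filter.mp hx
        have hxa : x ≠ a := by simpa using hne
        rcases List.mem_cons.mp ((hmem x).mpr hxs) with h | h
        · exact absurd h hxa
        · exact h
    rw [List.flatMap_cons]
    conv_lhs => rw [hsplit]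
    rw [pv_block c a _ (fun _ => h2cnt) (s.count a)]
    congr 1
    · congr 2
      unfold pvTC
      by_cases hc0 : c = 0
      · rw [if_pos hc0, if_pos hc0]
      · rw [if_neg hc0, if_neg hc0]
        congr 1
        exact (hcnt (a + c) (by omega)).symm
    · rw [ih hys' _ hs₂p hmem₂]
      apply pv_flatMap_congr
      intro b hb
      have hab : a < b := ha b hb
      have hcb : pvTC c s b = pvTC c (s.filter (fun y => !(y == a))) b := by
        unfold pvTC
        rw [hcnt b (by omega)]
        by_cases hc0 : c = 0
        · rw [if_pos hc0, if_pos hc0]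
        · rw [if_neg hc0, if_neg hc0, hcnt (b + c) (by omega)]
      rw [hcb]

-- sorting pairs (a, a+c) by first component is sorting the first components
theorem pv_insertBy_map (c : Int) (x : Int) : ∀ (l : List (Int)),
    PySem.List.insertBy (fun p q => decide (p.1 < q.1)) (x, x + c) (l.map (fun a => (a, a + c)))
      = (PySem.List.insertBy (fun a b => decide (a < b)) x l).map (fun a => (a, a + c)) := by
  intro l
  induction l with
  | nil => rfl
  | cons y t ih =>
    by_cases h : x < y <;> simp [PySem.List.insertBy, h, ih]

theorem pv_sorted_map_embed (c : Int) (l : List Int) :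
    PySem.List.sorted (l.map (fun a => (a, a + c))) (fun p => p.1) false
      = (PySem.List.sorted l (fun x => x) false).map (fun a => (a, a + c)) := by
  rw [PySem.List.sorted_eq_foldl_insertBy, PySem.List.sorted_eq_foldl_insertBy]
  suffices h : ∀ acc : List Int,
      (l.map (fun a => (a, a + c))).foldl
        (fun acc x => PySem.List.insertBy (fun a b => decide (a.1 < b.1)) x acc)
        (acc.map (fun a => (a, a + c)))
      = (l.foldl (fun acc x => PySem.List.insertBy (fun a b => decide (a < b)) x acc) acc).map
          (fun a => (a, a + c)) by
    simpa using h []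
  induction l with
  | nil => intro acc; rfl
  | cons y t ih =>
    intro acc
    rw [List.map_cons, List.foldl_cons, List.foldl_cons]
    rw [pv_insertBy_map c y acc]
    exact ih _

theorem pv_pyRepeat {α : Type} (xs : List α) (n : Int) :
    PySem.List.pyRepeat xs n = (List.replicate n.toNat xs).flatten := by
  rfl

theorem pv_floordiv (p : Nat) :
    (PySem.Int.floordiv ((p : Int) * ((p : Int) - 1)) 2).toNat = p * (p - 1) / 2 := by
  cases p with
  | zero => decide
  | succ k =>
    have h1 : (((k + 1 : Nat) : Int)) * ((((k + 1 : Nat) : Int)) - 1) = (((k + 1) * k : Nat) : Int) := by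
      push_cast; ring
    rw [h1]
    have h2 : PySem.Int.floordiv ((((k + 1) * k : Nat)) : Int) 2 = ((((k + 1) * k / 2 : Nat)) : Int) := by
      exact_mod_cast PySem.Int.floordiv_natCast ((k + 1) * k) 2
    rw [h2, Int.toNat_natCast]
    simp

-- the per-key equality: A's sorted nested scan = B's counter arithmetic
theorem pv_perkey (xs : List Int) (c : Int) (hcK : c ∈ pvK xs) :
    pvSegA (pvQc xs c) = pvSegB c (PySem.Dict.counter ((pvQc xs c).map Prod.fst)) := by
  have hcK' : c ∈ (pvQ xs).map pvKey := by
    unfold pvK at hcK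
    rwa [PySem.Set.mem_ofList] at hcK
  have hc0 : 0 ≤ c := by
    obtain ⟨q, hqQ, hqc⟩ := List.mem_map.mp hcK'
    have := pvQ_fst_le_snd xs q hqQ
    rw [← hqc]
    unfold pvKey
    omega
  have hq : ∀ q ∈ pvQc xs c, q.2 = q.1 + c := by
    intro q hqm
    have h2 := List.of_mem_filter hqm
    simp only [beq_iff_eq] at h2
    unfold pvKey at h2
    omega
  have h1 : pvQc xs c = ((pvQc xs c).map Prod.fst).map (fun a => (a, a + c)) := by
    rw [List.map_map]
    have hcg : ∀ q ∈ pvQc xs c, ((fun a => (a, a + c)) ∘ Prod.fst) q = id q := by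
      intro q hqm
      obtain ⟨q1, q2⟩ := q
      have := hq _ hqm
      simp at this
      simp [this]
    rw [List.map_congr_left hcg, List.map_id]
  have hs : (PySem.List.sorted ((pvQc xs c).map Prod.fst) (fun x => x) false).Pairwise (· ≤ ·) :=
    PySem.List.sorted_pairwise ((pvQc xs c).map Prod.fst) (fun x => x)
  have hys : (PySem.List.sorted (PySem.Set.ofList ((pvQc xs c).map Prod.fst)) (fun x => x) false).Pairwise (· < ·) :=
    PySem.List.sorted_ofList_pairwise_lt ((pvQc xs c).map Prod.fst)
  have hmem : ∀ x, x ∈ PySem.List.sorted (PySem.Set.ofList ((pvQc xs c).map Prod.fst)) (fun x => x) false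
      ↔ x ∈ PySem.List.sorted ((pvQc xs c).map Prod.fst) (fun x => x) false := by
    intro x
    rw [PySem.List.mem_sorted, PySem.List.mem_sorted, PySem.Set.mem_ofList]
  have hcountp : ∀ v : Int, (PySem.List.sorted ((pvQc xs c).map Prod.fst) (fun x => x) false).count v
      = ((pvQc xs c).map Prod.fst).count v := by
    intro v
    exact (PySem.List.sorted_perm _ _ _).count_eq v
  unfold pvSegA
  conv_lhs => rw [h1]
  rw [pv_sorted_map_embed c _]
  rw [pv_segA_map c _]
  rw [pv_main c hc0 _ hys _ hs hmem]
  unfold pvSegB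
  rw [PySem.Dict.keys_counter]
  apply pv_flatMap_congr
  intro a _
  rw [pv_pyRepeat]
  congr 2
  unfold pvTC
  by_cases hcz : c = 0
  · subst hcz
    rw [if_pos rfl]
    rw [if_pos (by rfl)]
    rw [PySem.Dict.getD_counter]
    rw [hcountp a]
    exact (pv_floordiv (((pvQc xs 0).map Prod.fst).count a)).symm
  · rw [if_neg hcz, if_neg (by simpa using hcz)]
    rw [PySem.Dict.getD_counter, PySem.Dict.getD_counter]
    rw [hcountp a, hcountp (a + c)]
    rw [← Int.natCast_mul, Int.toNat_natCast]

-- phase-1 folds of the two ports, stated in the ports' (zeta-reduced) shape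
theorem pv_phase1A' (xs : List Int) :
    (PySem.List.pyRange 0 ((xs.length : Int) - 1) 1).foldl (fun diffs i =>
        (PySem.List.pyRange (i + 1) (xs.length : Int) 1).foldl (fun diffs j =>
          if PySem.List.pyGetD xs i 0 < PySem.List.pyGetD xs j 0 then
            diffs.modify (PySem.List.pyGetD xs j 0 - PySem.List.pyGetD xs i 0) []
              (fun l => l ++ [(PySem.List.pyGetD xs i 0, PySem.List.pyGetD xs j 0)])
          else
            diffs.modify (PySem.List.pyGetD xs i 0 - PySem.List.pyGetD xs j 0) []
              (fun l => l ++ [(PySem.List.pyGetD xs j 0, PySem.List.pyGetD xs i 0)])) diffs) PySem.Dict.empty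
      = pvDA xs :=
  (pv_nested (fun s a b => if a < b then PySem.Dict.modify s (b - a) [] (fun l => l ++ [(a, b)])
      else PySem.Dict.modify s (a - b) [] (fun l => l ++ [(b, a)])) xs 0 PySem.Dict.empty).trans
    (pv_phase1A xs)

theorem pv_phase1B' (xs : List Int) :
    (PySem.List.pyRange 0 ((xs.length : Int) - 1) 1).foldl (fun diffs i =>
        (PySem.List.pyRange (i + 1) (xs.length : Int) 1).foldl (fun diffs j =>
          diffs.modify
            (if PySem.List.pyGetD xs i 0 ≤ PySem.List.pyGetD xs j 0 then
              PySem.List.pyGetD xs j 0 - PySem.List.pyGetD xs i 0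
             else PySem.List.pyGetD xs i 0 - PySem.List.pyGetD xs j 0) PySem.Dict.empty
            (fun grp => grp.modify
              (if PySem.List.pyGetD xs i 0 ≤ PySem.List.pyGetD xs j 0 then PySem.List.pyGetD xs i 0
               else PySem.List.pyGetD xs j 0) 0 (· + 1))) diffs) PySem.Dict.empty
      = pvDB xs :=
  (pv_nested (fun s a b =>
      PySem.Dict.modify s (if a ≤ b then b - a else a - b) PySem.Dict.empty
        (fun grp => grp.modify (if a ≤ b then a else b) 0 (· + 1))) xs 0 PySem.Dict.empty).trans
    (pv_phase1B xs)

-- ===== VERDICT (by name: the statement is the Claim_ definition above) =====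
theorem three_term_arithmetic_sequence_spec : Claim_equal_three_term_arithmetic_sequence := by
  intro xs _
  unfold Spec_three_term_arithmetic_sequence
  by_cases h3 : xs.length < 3
  · simp [three_term_arithmetic_sequence, three_term_arithmetic_sequence_alt, h3]
  · simp only [three_term_arithmetic_sequence, three_term_arithmetic_sequence_alt, if_neg h3]
    rw [pv_phase1A', pv_phase1B']
    rw [pv_phase2A (pvDA xs), pv_phase2B (pvDB xs)]
    rw [PySem.Dict.items_eq_map_keys (pvDA xs) (pv_nodupA xs) ([] : List (Int × Int))]
    rw [PySem.Dict.items_eq_map_keys (pvDB xs) (pv_nodupB xs) (PySem.Dict.empty : PySem.Dict Int Int)]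
    rw [pv_keysA, pv_keysB]
    rw [List.foldl_map, List.foldl_map]
    rw [PySem.List.foldl_append_eq_flatMap, PySem.List.foldl_append_eq_flatMap]
    rw [List.nil_append, List.nil_append]
    apply pv_flatMap_congr
    intro c hcK
    rw [pv_getDA xs c, pv_getDB xs c]
    exact pv_perkey xs c hcK
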